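-- pv_equiv track=rewrite | github.com/latikamehra/PythonProjects | CommonCodingProblems/MostCommonWords.py | freqCounter
-- ===== SOURCE A (Python) =====
-- def freqCounter(words):
--     counterDict = {}
--     maxCount = 0
--
--     for w in words:
--         counterDict.setdefault(w,0)
--         counterDict[w] += 1
--
--         if counterDict[w] > maxCount : maxCount = counterDict[w]
--
--     return (counterDict, maxCount)
-- ===== SOURCE B (Python) =====
-- def freqCounter(words):
--     seen = list(dict.fromkeys(words))
--     counterDict = {}
--     for w in seen:
--         counterDict[w] = words.count(w)
--     maxCount = max(counterDict.values(), default=0)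
--     return (counterDict, maxCount)
-- ===== Notes on version B (the rewrite author's own statement) =====
-- stated objective: alternative
-- what changed: B does no incremental counting: it dedups words with dict.fromkeys to get the distinct words in first-occurrence order, computes each word's frequency with a full words.count(w) scan, and takes max(values, default=0), replacing A's per-element dict update with in-loop running max.
import Mathlib
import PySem

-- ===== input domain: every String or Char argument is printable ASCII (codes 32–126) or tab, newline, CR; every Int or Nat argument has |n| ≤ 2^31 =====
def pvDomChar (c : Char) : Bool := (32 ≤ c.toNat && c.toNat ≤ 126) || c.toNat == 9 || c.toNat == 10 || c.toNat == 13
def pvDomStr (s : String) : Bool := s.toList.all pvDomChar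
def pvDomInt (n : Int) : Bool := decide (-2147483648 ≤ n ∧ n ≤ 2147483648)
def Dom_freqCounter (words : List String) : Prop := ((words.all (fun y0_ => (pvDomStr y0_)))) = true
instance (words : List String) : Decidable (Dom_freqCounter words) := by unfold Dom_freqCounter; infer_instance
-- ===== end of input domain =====

-- B replaces A's incremental dict counting with running max by a different algorithm:
-- collect the distinct words in first-occurrence order, count each with a full
-- words.count scan, then take max(values, default=0); objective: alternative.

-- ===== PORT A =====
def freqCounter (words : List String) : (List (String × Int)) × Int :=
  let s := words.foldl
    (fun (s : PySem.Dict String Int × Int) w =>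
      let d1 := s.1.setdefault w 0
      let d2 := d1.insert w (d1.getD w 0 + 1)
      let c := d2.getD w 0
      (d2, if c > s.2 then c else s.2))
    (PySem.Dict.empty, 0)
  (s.1.items, s.2)

-- ===== PORT B =====
def freqCounter_alt (words : List String) : (List (String × Int)) × Int :=
  let seen := PySem.List.dedup words
  let d := seen.foldl
    (fun (d : PySem.Dict String Int) w => d.insert w ((words.count w : Int)))
    PySem.Dict.empty
  (d.items, (PySem.List.max? d.values (fun y => y)).getD 0)

-- ===== PRECONDITION & SPEC =====
def Spec_freqCounter (words : List String) (out : (List (String × Int)) × Int) : Prop := out = freqCounter_alt words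
instance (words : List String) (out : (List (String × Int)) × Int) : Decidable (Spec_freqCounter words out) := by unfold Spec_freqCounter; infer_instance

-- ===== CLAIM (what is proved, stated in full; the proofs are below) =====
def Claim_equal_freqCounter : Prop := ∀ (words : List String), Dom_freqCounter words → Spec_freqCounter words (freqCounter words)

-- ===== LEMMAS AND PROOFS =====

-- A's loop body over the dict part equals the one-line counting update
lemma stepA_dict (d : PySem.Dict String Int) (w : String) :
    (d.setdefault w 0).insert w ((d.setdefault w 0).getD w 0 + 1)
      = d.insert w (d.getD w 0 + 1) := by
  by_cases h : d.contains w = true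
  · rw [PySem.Dict.setdefault_of_contains _ _ h]
  · rw [PySem.Dict.setdefault_of_not_contains _ _ (by simpa using h),
        PySem.Dict.getD_insert_self, PySem.Dict.insert_insert_self,
        PySem.Dict.getD_of_not_contains _ _ (by simpa using h)]

lemma dictA (l : List String) (d : PySem.Dict String Int) (m : Int) :
    (l.foldl
      (fun (s : PySem.Dict String Int × Int) w =>
        let d1 := s.1.setdefault w 0
        let d2 := d1.insert w (d1.getD w 0 + 1)
        let c := d2.getD w 0
        (d2, if c > s.2 then c else s.2)) (d, m)).1
      = l.foldl (fun d w => d.insert w (d.getD w 0 + 1)) d := by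
  induction l generalizing d m with
  | nil => rfl
  | cons w t ih =>
    simp only [List.foldl_cons]
    rw [ih, stepA_dict]

-- foldl-max helpers
lemma le_foldl_max_self (l : List Int) (a : Int) : a ≤ l.foldl max a := by
  induction l generalizing a with
  | nil => simp
  | cons x t ih => exact le_trans (le_max_left a x) (ih (max a x))

lemma mem_le_foldl_max (l : List Int) (a x : Int) (hx : x ∈ l) : x ≤ l.foldl max a := by
  induction l generalizing a with
  | nil => cases hx
  | cons y t ih =>
    rcases List.mem_cons.mp hx with rfl | h
    · exact le_trans (le_max_right a x) (le_foldl_max_self t _)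
    · exact ih _ h

lemma foldl_max_le (l : List Int) (a b : Int) (ha : a ≤ b) (h : ∀ x ∈ l, x ≤ b) :
    l.foldl max a ≤ b := by
  induction l generalizing a with
  | nil => exact ha
  | cons x t ih =>
    exact ih _ (max_le ha (h x (List.mem_cons_self))) (fun y hy => h y (List.mem_cons_of_mem _ hy))

-- the "maximum of the counts" of a word list
def M (xs : List String) : Int :=
  ((PySem.Set.ofList xs).map (fun k => ((xs.count k : Int)))).foldl max 0

lemma M_nonneg (xs : List String) : 0 ≤ M xs := le_foldl_max_self _ _

lemma count_le_M (xs : List String) (k : String) (hk : k ∈ xs) :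
    ((xs.count k : Int)) ≤ M xs := by
  exact mem_le_foldl_max _ _ _ (List.mem_map.mpr ⟨k, (PySem.Set.mem_ofList _ _).mpr hk, rfl⟩)

-- key lemma: appending w updates the max-of-counts exactly as A's running max does
lemma M_append (ws : List String) (w : String) :
    M (ws ++ [w]) = max (M ws) ((ws.count w : Int) + 1) := by
  apply le_antisymm
  · apply foldl_max_le
    · exact le_trans (M_nonneg ws) (le_max_left _ _)
    · intro x hx
      rcases List.mem_map.mp hx with ⟨k, hk, rfl⟩
      have hk' : k ∈ ws ++ [w] := (PySem.Set.mem_ofList _ _).mp hk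
      by_cases hkw : k = w
      · subst hkw
        have : (ws ++ [k]).count k = ws.count k + 1 := by
          simp [List.count_append]
        rw [this]; push_cast; exact le_max_right _ _
      · have : (ws ++ [w]).count k = ws.count k := by
          simp only [List.count_append, List.count_singleton]
          simp [Ne.symm hkw]
        rw [this]
        have hkws : k ∈ ws := by
          rcases List.mem_append.mp hk' with h | h
          · exact h
          · exact absurd (List.mem_singleton.mp h) hkw
        exact le_trans (count_le_M ws k hkws) (le_max_left _ _)
  · apply max_le
    · apply foldl_max_le
      · exact M_nonneg _
      · intro x hx
        rcases List.mem_map.mp hx with ⟨k, hk, rfl⟩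
        have hkws : k ∈ ws := (PySem.Set.mem_ofList _ _).mp hk
        have h1 : ((ws.count k : Int)) ≤ ((ws ++ [w]).count k : Int) := by
          simp [List.count_append]
        exact le_trans h1 (count_le_M (ws ++ [w]) k (List.mem_append.mpr (Or.inl hkws)))
    · have hw : w ∈ ws ++ [w] := List.mem_append.mpr (Or.inr (List.mem_singleton_self w))
      have : ((ws ++ [w]).count w : Int) = (ws.count w : Int) + 1 := by
        simp [List.count_append]
      rw [← this]; exact count_le_M _ _ hw

-- A's running max equals the max of the final counts
lemma maxA (ws : List String) :
    (ws.foldl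
      (fun (s : PySem.Dict String Int × Int) w =>
        let d1 := s.1.setdefault w 0
        let d2 := d1.insert w (d1.getD w 0 + 1)
        let c := d2.getD w 0
        (d2, if c > s.2 then c else s.2)) (PySem.Dict.empty, 0)).2 = M ws := by
  induction ws using List.reverseRecOn with
  | nil => rfl
  | append_singleton t w ih =>
    rw [List.foldl_append]
    set s := t.foldl
      (fun (s : PySem.Dict String Int × Int) w =>
        let d1 := s.1.setdefault w 0
        let d2 := d1.insert w (d1.getD w 0 + 1)
        let c := d2.getD w 0
        (d2, if c > s.2 then c else s.2)) (PySem.Dict.empty, 0) with hs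
    have hd : s.1 = PySem.Dict.counter t := by
      rw [hs, dictA, PySem.Dict.foldl_insert_getD_add_one_eq_counter]
    simp only [List.foldl_cons, List.foldl_nil, stepA_dict, hd]
    have hc : (PySem.Dict.counter t |>.insert w ((PySem.Dict.counter t).getD w 0 + 1)).getD w 0
        = (t.count w : Int) + 1 := by
      rw [PySem.Dict.getD_insert_self, PySem.Dict.getD_counter]
    rw [hc, ih, M_append]
    by_cases h : (t.count w : Int) + 1 ≤ M t
    · rw [if_neg (not_lt.mpr h), max_eq_left h]
    · rw [not_le] at h
      rw [if_pos h, max_eq_right (le_of_lt h)]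

-- max(l, default=0) = foldl max 0 when elements are nonnegative
lemma maxD_eq_foldl (l : List Int) (h : ∀ x ∈ l, 0 ≤ x) :
    (PySem.List.max? l (fun y => y)).getD 0 = l.foldl max 0 := by
  cases l with
  | nil => rfl
  | cons x t =>
    rw [PySem.List.max?_id_cons]
    have : max 0 x = x := max_eq_right (h x (List.mem_cons_self))
    simp [this]

-- B's dict (insert count-of-each-distinct-word over fresh keys) has exactly Counter's items
lemma itemsB (ws : List String) :
    ((PySem.Set.ofList ws).foldl
      (fun (d : PySem.Dict String Int) w => d.insert w ((ws.count w : Int)))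
      PySem.Dict.empty).items
      = (PySem.Set.ofList ws).map (fun k => (k, ((ws.count k : Int)))) := by
  rw [PySem.Dict.items_foldl_insert_fresh]
  · rfl
  · intro a _; exact PySem.Dict.contains_empty a
  · simpa using PySem.Set.nodup_ofList ws

-- ===== VERDICT (by name: the statement is the Claim_ definition above) =====
theorem freqCounter_spec : Claim_equal_freqCounter := by
  intro words _
  unfold Spec_freqCounter freqCounter freqCounter_alt
  simp only
  have hd := dictA words PySem.Dict.empty 0
  have hm := maxA words
  rw [hd, hm, PySem.Dict.foldl_insert_getD_add_one_eq_counter, PySem.Dict.items_counter,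
    PySem.List.dedup_eq_ofList]
  have hv : ((PySem.Set.ofList words).foldl
      (fun (d : PySem.Dict String Int) w => d.insert w ((words.count w : Int)))
      PySem.Dict.empty).values
      = (PySem.Set.ofList words).map (fun k => ((words.count k : Int))) := by
    simp only [PySem.Dict.values, itemsB, List.map_map]; rfl
  rw [Prod.ext_iff]
  refine ⟨by rw [itemsB], ?_⟩
  rw [hv, maxD_eq_foldl]
  · rfl
  · intro x hx
    rcases List.mem_map.mp hx with ⟨k, _, rfl⟩
    positivity
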